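-- pv_equiv track=rewrite | github.com/gall1314/squat-api-docker | romanian_deadlift_analysis.py | pick_strongest_per_category
-- ===== SOURCE A (Python) =====
-- FB_SEVERITY = {
--     "Go deeper - hinge more at the hips": 3,
--     "Bend your knees a bit more": 3,
--     "Too much knee bend": 3,
--     "Try to keep your back neutral": 2,
-- }
--
-- FEEDBACK_CATEGORY = {
--     "Go deeper - hinge more at the hips": "depth",
--     "Bend your knees a bit more": "knees",
--     "Too much knee bend": "knees",
--     "Try to keep your back neutral": "back",
-- }
--
-- def pick_strongest_per_category(feedback_list):
--     best_by_cat = {}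
--     for f in feedback_list or []:
--         cat = FEEDBACK_CATEGORY.get(f, "other")
--         best = best_by_cat.get(cat)
--         if not best or FB_SEVERITY.get(f, 1) > FB_SEVERITY.get(best, 1):
--             best_by_cat[cat] = f
--     return list(best_by_cat.values()), best_by_cat
-- ===== SOURCE B (Python) =====
-- FB_SEVERITY = {
--     "Go deeper - hinge more at the hips": 3,
--     "Bend your knees a bit more": 3,
--     "Too much knee bend": 3,
--     "Try to keep your back neutral": 2,
-- }
--
-- FEEDBACK_CATEGORY = {
--     "Go deeper - hinge more at the hips": "depth",
--     "Bend your knees a bit more": "knees",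
--     "Too much knee bend": "knees",
--     "Try to keep your back neutral": "back",
-- }
--
-- def pick_strongest_per_category(feedback_list):
--     # Phase 1: group feedback strings by category, in first-seen category order.
--     groups = {}
--     for f in feedback_list or []:
--         groups.setdefault(FEEDBACK_CATEGORY.get(f, "other"), []).append(f)
--     # Phase 2: reduce each group to its strongest entry.
--     best_by_cat = {}
--     for cat, fs in groups.items():
--         best = None
--         for f in fs:
--             if not best or FB_SEVERITY.get(f, 1) > FB_SEVERITY.get(best, 1):
--                 best = f
--         best_by_cat[cat] = best
--     return list(best_by_cat.values()), best_by_cat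
-- ===== Notes on version B (the rewrite author's own statement) =====
-- stated objective: alternative
-- what changed: A decides the per-category winner online with one conditional-insert pass over the feedback list; B first groups the feedback strings by category into lists (first-seen category order) and then reduces each group separately to its strongest entry with the same fold condition.
import Mathlib
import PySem

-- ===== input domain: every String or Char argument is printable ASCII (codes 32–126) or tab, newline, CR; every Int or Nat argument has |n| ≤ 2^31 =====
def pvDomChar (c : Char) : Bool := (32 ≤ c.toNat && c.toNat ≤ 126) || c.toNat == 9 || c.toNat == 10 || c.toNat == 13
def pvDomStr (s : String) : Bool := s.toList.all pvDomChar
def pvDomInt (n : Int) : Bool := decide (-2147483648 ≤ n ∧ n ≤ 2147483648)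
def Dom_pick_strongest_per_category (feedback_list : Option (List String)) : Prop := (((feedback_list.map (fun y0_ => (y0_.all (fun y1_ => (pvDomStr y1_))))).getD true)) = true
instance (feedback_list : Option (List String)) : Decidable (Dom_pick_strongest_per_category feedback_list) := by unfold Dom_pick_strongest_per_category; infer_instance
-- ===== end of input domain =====

-- B replaces A's single conditional-insert pass by a two-phase decomposition (group by category,
-- then reduce each group to its strongest entry); objective: alternative decomposition, same cost.

-- module constants shared by both versions (FB_SEVERITY / FEEDBACK_CATEGORY)
def fbSeverity : PySem.Dict String Int := PySem.Dict.ofList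
  [("Go deeper - hinge more at the hips", 3), ("Bend your knees a bit more", 3),
   ("Too much knee bend", 3), ("Try to keep your back neutral", 2)]

def feedbackCategory : PySem.Dict String String := PySem.Dict.ofList
  [("Go deeper - hinge more at the hips", "depth"), ("Bend your knees a bit more", "knees"),
   ("Too much knee bend", "knees"), ("Try to keep your back neutral", "back")]

-- ===== PORT A =====
-- loop body of A; `if not best or …` ported as a match on the Option (None and "" are falsy,
-- and the severity lookup on `best` is only reached when `best` is a string)
def pvAStep (d : PySem.Dict String String) (f : String) : PySem.Dict String String :=
  let cat := feedbackCategory.getD f "other"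
  match d.get? cat with
  | none => d.insert cat f
  | some best =>
      if best == "" || fbSeverity.getD f 1 > fbSeverity.getD best 1 then d.insert cat f else d

def pick_strongest_per_category (feedback_list : Option (List String)) : List String × (List (String × String)) :=
  let best_by_cat := (feedback_list.getD []).foldl pvAStep PySem.Dict.empty
  (best_by_cat.values, best_by_cat.items)

-- ===== PORT B =====
-- inner reduction step of B (`if not best or …: best = f`)
def pvStep (best : Option String) (f : String) : Option String :=
  match best with
  | none => some f
  | some b => if b == "" || fbSeverity.getD f 1 > fbSeverity.getD b 1 then some f else some b

def pvBestOf (fs : List String) : Option String := fs.foldl pvStep none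

def pick_strongest_per_category_alt (feedback_list : Option (List String)) : List String × (List (String × String)) :=
  -- phase 1: group feedback by category, in first-seen category order (setdefault+append = modify)
  let groups : PySem.Dict String (List String) :=
    (feedback_list.getD []).foldl
      (fun g f => g.modify (feedbackCategory.getD f "other") [] (fun l => l ++ [f])) PySem.Dict.empty
  -- phase 2: reduce each group to its strongest entry (`.getD ""` only guards the impossible
  -- empty-group case: every stored group is nonempty, matching Python's non-None `best`)
  let best_by_cat :=
    groups.items.foldl (fun d p => d.insert p.1 ((pvBestOf p.2).getD "")) PySem.Dict.empty
  (best_by_cat.values, best_by_cat.items)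

-- ===== PRECONDITION & SPEC =====
def Spec_pick_strongest_per_category (feedback_list : Option (List String)) (out : List String × (List (String × String))) : Prop := out = pick_strongest_per_category_alt feedback_list
instance (feedback_list : Option (List String)) (out : List String × (List (String × String))) : Decidable (Spec_pick_strongest_per_category feedback_list out) := by unfold Spec_pick_strongest_per_category; infer_instance

-- ===== CLAIM (what is proved, stated in full; the proofs are below) =====
def Claim_equal_pick_strongest_per_category : Prop := ∀ (feedback_list : Option (List String)), Dom_pick_strongest_per_category feedback_list → Spec_pick_strongest_per_category feedback_list (pick_strongest_per_category feedback_list)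

-- ===== LEMMAS AND PROOFS =====

-- proof-side abbreviations: the category key, the per-category sublist, and the canonical
-- items list pvM that BOTH final dicts are shown to equal
def pvCat (f : String) : String := feedbackCategory.getD f "other"
def pvFilt (xs : List String) (c : String) : List String := xs.filter (fun f => pvCat f == c)
def pvM (xs : List String) : List (String × String) :=
  (PySem.Set.ofList (xs.map pvCat)).map (fun c => (c, (pvBestOf (pvFilt xs c)).getD ""))

lemma pvStep_isSome (b : Option String) (f : String) : (pvStep b f).isSome := by
  cases b <;> simp only [pvStep] <;> first | rfl | (split <;> rfl)

lemma pvBestOf_ne_none (fs : List String) (h : fs ≠ []) : ∃ b, pvBestOf fs = some b := by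
  have aux : ∀ (t : List String) (b : String), ∃ c, t.foldl pvStep (some b) = some c := by
    intro t
    induction t with
    | nil => intro b; exact ⟨b, rfl⟩
    | cons a t ih =>
      intro b
      cases hs : pvStep (some b) a with
      | none => have := pvStep_isSome (some b) a; rw [hs] at this; simp at this
      | some c => simpa [List.foldl_cons, hs] using ih c
  cases fs with
  | nil => exact absurd rfl h
  | cons a t => simpa [pvBestOf, pvStep] using aux t a

lemma pvBestOf_append (fs : List String) (f : String) :
    pvBestOf (fs ++ [f]) = pvStep (pvBestOf fs) f := by
  simp [pvBestOf, List.foldl_append]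

lemma pvM_keys (xs : List String) :
    (PySem.Dict.mk (pvM xs)).keys = PySem.Set.ofList (xs.map pvCat) := by
  simp [PySem.Dict.keys_mk, pvM, List.map_map, Function.comp_def]

lemma pvM_nodup_keys (xs : List String) : (PySem.Dict.mk (pvM xs)).keys.Nodup := by
  rw [pvM_keys]; exact PySem.Set.nodup_ofList _

lemma pvFilt_nil_of_not_mem (xs : List String) (c : String) (h : c ∉ xs.map pvCat) :
    pvFilt xs c = [] := by
  rw [pvFilt, List.filter_eq_nil_iff]
  intro a ha hc
  exact h (List.mem_map.mpr ⟨a, ha, by simpa using hc⟩)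

lemma pvFilt_append (xs : List String) (f c : String) (h : pvCat f ≠ c) :
    pvFilt (xs ++ [f]) c = pvFilt xs c := by
  simp [pvFilt, List.filter_append, h]

lemma pvFilt_append_self (xs : List String) (f : String) :
    pvFilt (xs ++ [f]) (pvCat f) = pvFilt xs (pvCat f) ++ [f] := by
  simp [pvFilt, List.filter_append]

lemma pvFilt_ne_nil (xs : List String) (c : String) (h : c ∈ xs.map pvCat) :
    pvFilt xs c ≠ [] := by
  obtain ⟨a, ha, rfl⟩ := List.mem_map.mp h
  intro hnil
  have : a ∈ pvFilt xs (pvCat a) := List.mem_filter.mpr ⟨ha, by simp⟩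
  simp [hnil] at this

lemma pvM_get?_mem (xs : List String) (c : String) (h : c ∈ PySem.Set.ofList (xs.map pvCat)) :
    (PySem.Dict.mk (pvM xs)).get? c = some ((pvBestOf (pvFilt xs c)).getD "") := by
  apply PySem.Dict.get?_of_mem_items _ _ (pvM_nodup_keys xs)
  exact List.mem_map.mpr ⟨c, h, rfl⟩

lemma pvM_get?_not_mem (xs : List String) (c : String)
    (h : c ∉ PySem.Set.ofList (xs.map pvCat)) :
    (PySem.Dict.mk (pvM xs)).get? c = none := by
  rw [PySem.Dict.get?_eq_none_iff_not_mem_keys, pvM_keys]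
  exact h

-- A's single conditional-insert pass produces exactly the canonical dict
lemma pvA_eq_M (xs : List String) :
    xs.foldl pvAStep PySem.Dict.empty = PySem.Dict.mk (pvM xs) := by
  induction xs using List.reverseRecOn with
  | nil => apply PySem.Dict.ext; rfl
  | append_singleton xs f ih =>
    rw [List.foldl_append, List.foldl_cons, List.foldl_nil, ih]
    have hS' : PySem.Set.ofList ((xs ++ [f]).map pvCat)
        = PySem.Set.add (PySem.Set.ofList (xs.map pvCat)) (pvCat f) := by
      rw [List.map_append]; exact PySem.Set.ofList_append_singleton _ _
    by_cases hc : pvCat f ∈ PySem.Set.ofList (xs.map pvCat)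
    · obtain ⟨b, hb⟩ := pvBestOf_ne_none (pvFilt xs (pvCat f))
        (pvFilt_ne_nil xs (pvCat f) ((PySem.Set.mem_ofList _ _).mp hc))
      have hget := pvM_get?_mem xs (pvCat f) hc
      rw [hb] at hget
      have hSeq : PySem.Set.ofList ((xs ++ [f]).map pvCat) = PySem.Set.ofList (xs.map pvCat) :=
        hS'.trans (PySem.Set.add_of_mem hc)
      by_cases hcond : (b == "" || fbSeverity.getD f 1 > fbSeverity.getD b 1) = true
      · -- A inserts in place
        have hcont : (PySem.Dict.mk (pvM xs)).contains (pvCat f) = true := by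
          rw [PySem.Dict.contains_eq_decide_mem_keys, pvM_keys]
          simpa using hc
        apply PySem.Dict.ext
        show (pvAStep (PySem.Dict.mk (pvM xs)) f).items = pvM (xs ++ [f])
        rw [show pvAStep (PySem.Dict.mk (pvM xs)) f
            = (PySem.Dict.mk (pvM xs)).insert (pvCat f) f by
          simp only [pvAStep, pvCat] at hget ⊢
          rw [hget]
          simp [hcond]]
        rw [PySem.Dict.items_insert_of_contains _ _ hcont]
        unfold pvM
        rw [hSeq, List.map_map]
        apply List.map_congr_left
        intro c hcS
        by_cases hcf : c = pvCat f
        · subst hcf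
          simp only [Function.comp_apply, beq_self_eq_true, if_pos]
          rw [pvFilt_append_self, pvBestOf_append, hb]
          simp [pvStep, hcond]
        · have : (c == pvCat f) = false := by simpa using hcf
          simp only [Function.comp_apply, this, Bool.false_eq_true, if_false]
          rw [pvFilt_append xs f c (fun h => hcf h.symm)]
      · -- A leaves the dict unchanged
        rw [show pvAStep (PySem.Dict.mk (pvM xs)) f = PySem.Dict.mk (pvM xs) by
          simp only [pvAStep, pvCat] at hget ⊢
          rw [hget]
          simp [hcond]]
        congr 1
        unfold pvM
        rw [hSeq]
        apply List.map_congr_left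
        intro c hcS
        by_cases hcf : c = pvCat f
        · subst hcf
          rw [pvFilt_append_self, pvBestOf_append, hb]
          simp [pvStep, hcond]
        · rw [pvFilt_append xs f c (fun h => hcf h.symm)]
    · -- new category: A appends
      have hget := pvM_get?_not_mem xs (pvCat f) hc
      have hcont : (PySem.Dict.mk (pvM xs)).contains (pvCat f) = false := by
        rw [PySem.Dict.contains_eq_decide_mem_keys, pvM_keys]
        simpa using hc
      apply PySem.Dict.ext
      show (pvAStep (PySem.Dict.mk (pvM xs)) f).items = pvM (xs ++ [f])
      rw [show pvAStep (PySem.Dict.mk (pvM xs)) f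
          = (PySem.Dict.mk (pvM xs)).insert (pvCat f) f by
        simp only [pvAStep, pvCat] at hget ⊢
        rw [hget]]
      rw [PySem.Dict.items_insert_of_not_contains _ _ hcont]
      unfold pvM
      rw [hS', PySem.Set.add_of_not_mem hc, List.map_append]
      congr 1
      · apply List.map_congr_left
        intro c hcS
        have hcf : pvCat f ≠ c := fun h => hc (h ▸ hcS)
        rw [pvFilt_append xs f c hcf]
      · simp only [List.map_cons, List.map_nil]
        rw [pvFilt_append_self, pvFilt_nil_of_not_mem xs (pvCat f)
          (fun h => hc ((PySem.Set.mem_ofList _ _).mpr h))]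
        simp [pvBestOf, pvStep]

-- B's grouping pass: items are the per-category sublists, keyed in first-seen order
lemma pvGroups_items (xs : List String) :
    (xs.foldl (fun g f => g.modify (feedbackCategory.getD f "other") [] (fun l => l ++ [f]))
      (PySem.Dict.empty : PySem.Dict String (List String))).items
    = (PySem.Set.ofList (xs.map pvCat)).map (fun c => (c, pvFilt xs c)) := by
  set G := xs.foldl (fun g f => g.modify (feedbackCategory.getD f "other") [] (fun l => l ++ [f]))
      (PySem.Dict.empty : PySem.Dict String (List String)) with hG
  have hkeys : G.keys = PySem.Set.ofList (xs.map pvCat) := by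
    rw [hG]
    rw [PySem.Dict.keys_foldl_modify_key xs (fun f => feedbackCategory.getD f "other") []
      (fun _ f => (fun l => l ++ [f]))]
    simp only [PySem.Set.update_nil_left, PySem.Dict.keys_empty]
    rfl
  have hnd : G.keys.Nodup := by rw [hkeys]; exact PySem.Set.nodup_ofList _
  have hgetD : ∀ c, G.getD c [] = pvFilt xs c := by
    intro c
    rw [hG]
    have : xs.foldl (fun g f => g.modify (feedbackCategory.getD f "other") [] (fun l => l ++ [f]))
        (PySem.Dict.empty : PySem.Dict String (List String))
      = (xs.map (fun f => (pvCat f, f))).foldl (fun d p => d.modify p.1 [] (fun l => l ++ [p.2]))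
        PySem.Dict.empty := by
      rw [List.foldl_map]; rfl
    rw [this, PySem.Dict.getD_foldl_modify_append]
    simp [pvFilt, List.filter_map, Function.comp_def]
  rw [PySem.Dict.items_eq_map_keys G hnd [], hkeys]
  exact List.map_congr_left (fun c _ => by rw [hgetD c])

-- B's reduction pass over those items produces the same canonical dict
lemma pvB_eq_M (xs : List String) :
    ((xs.foldl (fun g f => g.modify (feedbackCategory.getD f "other") [] (fun l => l ++ [f]))
        (PySem.Dict.empty : PySem.Dict String (List String))).items.foldl
      (fun d p => d.insert p.1 ((pvBestOf p.2).getD "")) PySem.Dict.empty)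
    = PySem.Dict.mk (pvM xs) := by
  apply PySem.Dict.ext
  have h := PySem.Dict.items_foldl_insert_fresh
    ((PySem.Set.ofList (xs.map pvCat)).map (fun c => (c, pvFilt xs c)))
    Prod.fst (fun p => (pvBestOf p.2).getD "") PySem.Dict.empty
    (by intro a _; simp)
    (by simp [List.map_map, Function.comp_def])
  rw [pvGroups_items]
  refine h.trans ?_
  simp [pvM, List.map_map, Function.comp_def]
  rfl

-- ===== VERDICT (by name: the statement is the Claim_ definition above) =====
theorem pick_strongest_per_category_spec : Claim_equal_pick_strongest_per_category := by
  intro fl _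
  unfold Spec_pick_strongest_per_category
  show pick_strongest_per_category fl = pick_strongest_per_category_alt fl
  simp only [pick_strongest_per_category, pick_strongest_per_category_alt]
  rw [pvA_eq_M, pvB_eq_M]
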